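-- pv_equiv track=rewrite | github.com/Jae-soon/Algorithmic | Programmers/Lv2/멀리 뛰기.py | solution
-- ===== SOURCE A (Python) =====
-- def solution(n):
--     answer = 0
--
--     if n < 3:
--         return n
--
--     distance = [0] * (n + 1)
--     distance[1] = 1
--     distance[2] = 2
--
--     for i in range(3, n+1):
--         distance[i] = distance[i - 1] + distance[i - 2]
--
--     return distance[n] % 1234567
-- ===== SOURCE B (Python) =====
-- def solution(n):
--     if n < 3:
--         return n
--     M = 1234567
--
--     def fd(k):
--         # returns (fib(k) % M, fib(k+1) % M), fib(0)=0, fib(1)=1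
--         if k == 0:
--             return (0, 1)
--         a, b = fd(k // 2)
--         c = a * (2 * b - a) % M
--         d = (a * a + b * b) % M
--         if k % 2 == 1:
--             return (d, (c + d) % M)
--         return (c, d)
--
--     return fd(n + 1)[0]
-- ===== Notes on version B (the rewrite author's own statement) =====
-- stated objective: faster
-- what changed: replaced the O(n) DP array that fills every Fibonacci value with a recursive fast-doubling computation of fib(n+1) under the problem's modulus, reducing the work to O(log n) modular steps
import Mathlib
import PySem

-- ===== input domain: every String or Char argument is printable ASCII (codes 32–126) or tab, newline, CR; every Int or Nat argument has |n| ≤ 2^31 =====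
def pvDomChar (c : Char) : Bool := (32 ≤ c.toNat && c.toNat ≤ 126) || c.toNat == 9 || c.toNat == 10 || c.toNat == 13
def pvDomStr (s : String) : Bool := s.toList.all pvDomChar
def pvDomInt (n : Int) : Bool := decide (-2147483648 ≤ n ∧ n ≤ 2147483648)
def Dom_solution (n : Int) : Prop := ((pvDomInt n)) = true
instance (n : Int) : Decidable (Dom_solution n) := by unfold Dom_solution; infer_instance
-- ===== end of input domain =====

-- B replaces A's linear DP array with recursive fast doubling of the Fibonacci recurrence mod 1234567 (faster).

-- ===== PORT A =====
-- literal port of A's array DP; every index used is nonnegative and in range when n ≥ 3, so .toNat is exact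
def solution (n : Int) : Int :=
  if n < 3 then n
  else
    let d0 : List Int := List.replicate (n + 1).toNat 0
    let d1 := d0.set 1 1
    let d2 := d1.set 2 2
    let d := (PySem.List.pyRange 3 (n + 1) 1).foldl
      (fun dl i => dl.set i.toNat (dl.getD (i - 1).toNat 0 + dl.getD (i - 2).toNat 0)) d2
    (d.getD n.toNat 0) % 1234567

-- ===== PORT B =====
-- fast doubling: fdAlt k computes (fib k mod 1234567, fib (k+1) mod 1234567), fib 0 = 0, fib 1 = 1
def fdAlt (k : Nat) : Int × Int :=
  if h : k = 0 then (0, 1)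
  else
    let p := fdAlt (k / 2)
    let a := p.1
    let b := p.2
    let c := a * (2 * b - a) % 1234567
    let d := (a * a + b * b) % 1234567
    if k % 2 = 1 then (d, (c + d) % 1234567) else (c, d)
termination_by k
decreasing_by exact Nat.div_lt_self (Nat.pos_of_ne_zero h) one_lt_two

def solution_alt (n : Int) : Int :=
  if n < 3 then n else (fdAlt (n + 1).toNat).1

-- ===== PRECONDITION & SPEC =====
def Spec_solution (n : Int) (out : Int) : Prop := out = solution_alt n
instance (n : Int) (out : Int) : Decidable (Spec_solution n out) := by unfold Spec_solution; infer_instance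

-- ===== CLAIM (what is proved, stated in full; the proofs are below) =====
def Claim_equal_solution : Prop := ∀ (n : Int), Dom_solution n → Spec_solution n (solution n)

-- ===== LEMMAS AND PROOFS =====

lemma getD1 (len : Nat) (h : 4 ≤ len) :
    ((((List.replicate len (0:Int)).set 1 1).set 2 2)).getD 1 0 = 1 := by
  have h1 : 1 < len := by omega
  simp [List.getD_eq_getElem?_getD, List.length_set, List.length_replicate, h1]

lemma getD2 (len : Nat) (h : 4 ≤ len) :
    ((((List.replicate len (0:Int)).set 1 1).set 2 2)).getD 2 0 = 2 := by
  have h2 : 2 < len := by omega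
  simp [List.getD_eq_getElem?_getD, List.length_set, List.length_replicate, h2]

lemma fib_cast_two_mul (m : Nat) :
    (Nat.fib (2 * m) : Int) = (Nat.fib m : Int) * (2 * (Nat.fib (m + 1) : Int) - (Nat.fib m : Int)) := by
  have h1 : Nat.fib m ≤ Nat.fib (m + 1) := Nat.fib_mono (by omega)
  have h : Nat.fib m ≤ 2 * Nat.fib (m + 1) := by omega
  rw [Nat.fib_two_mul]
  push_cast [Nat.cast_sub h]
  ring

-- fast doubling computes the Fibonacci pair mod 1234567
lemma fdAlt_eq (k : Nat) :
    fdAlt k = ((Nat.fib k : Int) % 1234567, (Nat.fib (k + 1) : Int) % 1234567) := by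
  induction k using Nat.strong_induction_on with
  | _ k ih =>
    rw [fdAlt]
    by_cases h : k = 0
    · simp [h]
    · simp only [h, dite_false]
      set m := k / 2 with hm
      rw [ih m (by omega)]
      have ha : ((Nat.fib m : Int) % 1234567) ≡ (Nat.fib m : Int) [ZMOD 1234567] :=
        Int.emod_emod_of_dvd _ dvd_rfl
      have hb : ((Nat.fib (m+1) : Int) % 1234567) ≡ (Nat.fib (m+1) : Int) [ZMOD 1234567] :=
        Int.emod_emod_of_dvd _ dvd_rfl
      have hc : ((Nat.fib m : Int) % 1234567) * (2 * ((Nat.fib (m+1) : Int) % 1234567) - (Nat.fib m : Int) % 1234567) % 1234567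
          = (Nat.fib (2*m) : Int) % 1234567 := by
        rw [fib_cast_two_mul]
        exact ha.mul ((hb.mul_left 2).sub ha)
      have hd : (((Nat.fib m : Int) % 1234567) * ((Nat.fib m : Int) % 1234567) + ((Nat.fib (m+1) : Int) % 1234567) * ((Nat.fib (m+1) : Int) % 1234567)) % 1234567
          = (Nat.fib (2*m+1) : Int) % 1234567 := by
        have : (Nat.fib (2*m+1) : Int) = (Nat.fib m : Int) * (Nat.fib m : Int) + (Nat.fib (m+1) : Int) * (Nat.fib (m+1) : Int) := by
          rw [Nat.fib_two_mul_add_one]; push_cast; ring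
        rw [this]
        exact (ha.mul ha).add (hb.mul hb)
      by_cases hp : k % 2 = 1
      · have hk : k = 2*m + 1 := by omega
        simp only [hp, if_true]
        have hsum : ((Nat.fib (2*m) : Int) % 1234567 + (Nat.fib (2*m+1) : Int) % 1234567) % 1234567
            = (Nat.fib (2*m+2) : Int) % 1234567 := by
          have : (Nat.fib (2*m+2) : Int) = (Nat.fib (2*m) : Int) + (Nat.fib (2*m+1) : Int) := by
            rw [Nat.fib_add_two]; push_cast; ring
          have e1 : ((Nat.fib (2*m) : Int) % 1234567) ≡ (Nat.fib (2*m) : Int) [ZMOD 1234567] :=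
            Int.emod_emod_of_dvd _ dvd_rfl
          have e2 : ((Nat.fib (2*m+1) : Int) % 1234567) ≡ (Nat.fib (2*m+1) : Int) [ZMOD 1234567] :=
            Int.emod_emod_of_dvd _ dvd_rfl
          rw [this]
          exact e1.add e2
        rw [hc, hd, hsum, show k = 2*m+1 from hk]
      · have hk : k = 2*m := by omega
        simp only [hp, if_false]
        rw [hc, hd, show k = 2*m from hk]

-- A's filling loop: starting from a list whose entries m-2 and m-1 hold fib (m-1) and fib m,
-- after range(m, m+k) the entry m+k-1 holds fib (m+k)
lemma loop_inv (k : Nat) : ∀ (m : Nat) (L : List Int), 2 ≤ m → m + k ≤ L.length →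
    L.getD (m - 2) 0 = (Nat.fib (m - 1) : Int) → L.getD (m - 1) 0 = (Nat.fib m : Int) →
    ((PySem.List.pyRange (m : Int) ((m : Int) + (k : Int)) 1).foldl
      (fun dl i => dl.set i.toNat (dl.getD (i - 1).toNat 0 + dl.getD (i - 2).toNat 0)) L).getD
        (m + k - 1) 0 = (Nat.fib (m + k) : Int) := by
  induction k with
  | zero =>
    intro m L hm hlen hA hB
    rw [show ((m:Int) + (0:Nat)) = (m:Int) by push_cast; ring,
      PySem.List.pyRange_one_eq_nil le_rfl]
    simpa using hB
  | succ k ih =>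
    intro m L hm hlen hA hB
    have hlt : (m : Int) < (m : Int) + ((k+1 : Nat) : Int) := by push_cast; omega
    rw [PySem.List.pyRange_one_cons hlt]
    simp only [List.foldl_cons]
    have htn : ((m : Int)).toNat = m := by omega
    have ht1 : ((m : Int) - 1).toNat = m - 1 := by omega
    have ht2 : ((m : Int) - 2).toNat = m - 2 := by omega
    have hmlen : m < L.length := by omega
    have hfib : (Nat.fib m : Int) + (Nat.fib (m-1) : Int) = (Nat.fib (m+1) : Int) := by
      have key : Nat.fib ((m-1)+2) = Nat.fib (m-1) + Nat.fib ((m-1)+1) := Nat.fib_add_two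
      rw [show (m-1)+2 = m+1 from by omega, show (m-1)+1 = m from by omega] at key
      rw [key]; push_cast; ring
    set L1 := L.set ((m:Int)).toNat (L.getD ((m:Int)-1).toNat 0 + L.getD ((m:Int)-2).toNat 0) with hL1
    have hL1v : L1 = L.set m ((Nat.fib (m+1) : Int)) := by
      rw [hL1, htn, ht1, ht2, hA, hB, hfib]
    have harg : (m : Int) + ((k+1:Nat) : Int) = ((m+1 : Nat) : Int) + ((k : Nat) : Int) := by
      push_cast; ring
    rw [harg]
    have hres := ih (m+1) L1 (by omega)
      (by rw [hL1v]; simp [List.length_set]; omega)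
      (by rw [hL1v]
          have : m + 1 - 2 = m - 1 := by omega
          rw [this, List.getD_eq_getElem?_getD, List.getElem?_set]
          have hne : ¬ (m = m - 1) := by omega
          simp [hne]
          rw [← List.getD_eq_getElem?_getD]
          exact hB)
      (by rw [hL1v]
          have : m + 1 - 1 = m := by omega
          rw [this, List.getD_eq_getElem?_getD, List.getElem?_set]
          simp [hmlen])
    have hidx : m + 1 + k - 1 = m + (k+1) - 1 := by omega
    have hfa : m + 1 + k = m + (k+1) := by omega
    rw [hidx, hfa] at hres
    exact hres

lemma solution_eq_alt (n : Int) : solution n = solution_alt n := by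
  unfold solution solution_alt
  by_cases h : n < 3
  · simp [h]
  · simp only [h, if_false]
    have hn : 3 ≤ n := by omega
    set len := (n + 1).toNat with hlen
    have hlen4 : 4 ≤ len := by omega
    set L : List Int := ((List.replicate len 0).set 1 1).set 2 2 with hL
    have hLlen : L.length = len := by simp [hL]
    have h1 : L.getD 1 0 = (Nat.fib 2 : Int) := by
      rw [hL, getD1 len hlen4]; decide
    have h2 : L.getD 2 0 = (Nat.fib 3 : Int) := by
      rw [hL, getD2 len hlen4]; decide
    set k := (n - 2).toNat with hk
    have hinv := loop_inv k 3 L (by omega) (by omega) (by simpa using h1) (by simpa using h2)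
    rw [show ((3:Nat) : Int) = (3 : Int) from by norm_num] at hinv
    rw [show (3:Int) + (k : Int) = n + 1 from by omega] at hinv
    have hidx : 3 + k - 1 = n.toNat := by omega
    have hfa : 3 + k = n.toNat + 1 := by omega
    rw [hidx, hfa] at hinv
    rw [hinv, fdAlt_eq]
    have hlen' : len = n.toNat + 1 := by omega
    rw [hlen']

-- ===== VERDICT (by name: the statement is the Claim_ definition above) =====
theorem solution_spec : Claim_equal_solution := by
  intro n _
  unfold Spec_solution
  exact solution_eq_alt n
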